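-- pv_equiv track=rewrite | github.com/Luthey-Schulten-Lab/Lattice_Microbes | src/jlm/jLM/Analysis.py | _frameParse
-- ===== SOURCE A (Python) =====
-- def _frameParse(ts, frameStart, frameEnd, timeStart, timeEnd):
--
--     if (frameStart is not None and timeStart is not None):
--         RuntimeError("Specify either frameStart or timeStart")
--     if (frameEnd is not None and timeEnd is not None):
--         RuntimeError("Specify either frameStart or timeStart")
--
--     if timeStart is not None:
--         for i,t in enumerate(ts):
--             if t>timeStart:
--                 frameStart = i-1
--                 break
--
--     if timeEnd is not None:
--         for i,t in reversed(list(enumerate(ts))):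
--             if t<timeEnd:
--                 frameEnd = i
--                 break
--
--     if frameStart is None:
--         frameStart = 0
--
--     if frameEnd is None:
--         frameEnd = -1
--
--     if frameStart < 0:
--         frameStart += len(ts)
--
--     if frameEnd < 0:
--         frameEnd += len(ts)
--
--     return frameStart, frameEnd+1
-- ===== SOURCE B (Python) =====
-- def _frameParse(ts, frameStart, frameEnd, timeStart, timeEnd):
--     # Single forward pass computing both bounds at once, instead of A's two
--     # scans (one of which materialises and reverses an enumerated list).
--     if timeStart is not None or timeEnd is not None:
--         first_gt = None
--         last_lt = None
--         for i, t in enumerate(ts):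
--             if first_gt is None and timeStart is not None and t > timeStart:
--                 first_gt = i
--             if timeEnd is not None and t < timeEnd:
--                 last_lt = i
--         if timeStart is not None and first_gt is not None:
--             frameStart = first_gt - 1
--         if timeEnd is not None and last_lt is not None:
--             frameEnd = last_lt
--     n = len(ts)
--     if frameStart is None:
--         frameStart = 0
--     if frameEnd is None:
--         frameEnd = -1
--     if frameStart < 0:
--         frameStart += n
--     if frameEnd < 0:
--         frameEnd += n
--     return frameStart, frameEnd + 1
-- ===== Notes on version B (the rewrite author's own statement) =====
-- stated objective: alternative
-- what changed: Replaces A's two separate scans (a forward break-loop plus a reversed(list(enumerate(...))) backward break-loop) by one forward pass that tracks the first index with t>timeStart and the last index with t<timeEnd simultaneously, avoiding the list materialisation and reversal.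
import Mathlib
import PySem

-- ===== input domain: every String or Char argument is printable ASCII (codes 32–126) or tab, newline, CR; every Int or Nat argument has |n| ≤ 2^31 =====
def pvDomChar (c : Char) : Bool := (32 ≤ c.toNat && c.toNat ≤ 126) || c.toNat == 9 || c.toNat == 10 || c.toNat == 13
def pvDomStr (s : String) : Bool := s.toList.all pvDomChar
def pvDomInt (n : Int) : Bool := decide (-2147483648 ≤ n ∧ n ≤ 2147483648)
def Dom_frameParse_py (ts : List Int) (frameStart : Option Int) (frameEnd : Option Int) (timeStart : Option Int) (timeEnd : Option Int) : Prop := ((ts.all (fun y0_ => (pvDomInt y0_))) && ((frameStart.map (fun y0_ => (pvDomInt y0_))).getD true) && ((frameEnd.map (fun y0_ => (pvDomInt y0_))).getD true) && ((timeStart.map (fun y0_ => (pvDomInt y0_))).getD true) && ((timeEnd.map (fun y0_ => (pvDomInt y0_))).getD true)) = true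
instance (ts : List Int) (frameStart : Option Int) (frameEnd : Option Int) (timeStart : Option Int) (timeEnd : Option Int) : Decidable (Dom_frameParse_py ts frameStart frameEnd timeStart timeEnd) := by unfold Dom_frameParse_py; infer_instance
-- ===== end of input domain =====

-- B replaces A's two scans (forward break-loop + reversed enumerated-list break-loop)
-- by one forward pass tracking both bounds; alternative structure, same O(n) cost.


-- ===== PORT A =====
-- enumerate(ts) with running index i
def aEnum : List Int → Int → List (Int × Int)
  | [], _ => []
  | t :: r, i => (i, t) :: aEnum r (i + 1)

-- 'for i,t in enumerate(ts): if t>timeStart: frameStart = i-1; break'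
def aFwd : List Int → Int → Int → Option Int
  | [], _, _ => none
  | t :: r, v, i => if t > v then some (i - 1) else aFwd r v (i + 1)

-- 'for i,t in reversed(list(enumerate(ts))): if t<timeEnd: frameEnd = i; break'
def aRev : List (Int × Int) → Int → Option Int
  | [], _ => none
  | (i, t) :: r, v => if t < v then some i else aRev r v

def frameParse_py (ts : List Int) (frameStart : Option Int) (frameEnd : Option Int) (timeStart : Option Int) (timeEnd : Option Int) : Int × Int :=
  -- the two RuntimeError(...) lines in A construct an exception but never raise it: no-ops
  let fs : Option Int :=
    match timeStart with
    | none => frameStart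
    | some v => match aFwd ts v 0 with
                | some j => some j
                | none => frameStart
  let fe : Option Int :=
    match timeEnd with
    | none => frameEnd
    | some v => match aRev (aEnum ts 0).reverse v with
                | some j => some j
                | none => frameEnd
  let a := fs.getD 0
  let b := fe.getD (-1)
  let a := if a < 0 then a + (ts.length : Int) else a
  let b := if b < 0 then b + (ts.length : Int) else b
  (a, b + 1)

-- ===== PORT B =====
-- the single forward loop: returns (first_gt, last_lt)
def bScan : List Int → Option Int → Option Int → Option Int → Option Int → Int → Option Int × Option Int
  | [], _, _, fg, ll, _ => (fg, ll)
  | t :: r, tS, tE, fg, ll, i =>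
      let fg' := if fg.isNone && (match tS with | some v => decide (t > v) | none => false) then some i else fg
      let ll' := if (match tE with | some v => decide (t < v) | none => false) then some i else ll
      bScan r tS tE fg' ll' (i + 1)

def frameParse_py_alt (ts : List Int) (frameStart : Option Int) (frameEnd : Option Int) (timeStart : Option Int) (timeEnd : Option Int) : Int × Int :=
  let (fs, fe) :=
    if timeStart.isSome || timeEnd.isSome then
      let (fg, ll) := bScan ts timeStart timeEnd none none 0
      let fs := if timeStart.isSome then (match fg with | some j => some (j - 1) | none => frameStart) else frameStart
      let fe := if timeEnd.isSome then (match ll with | some j => some j | none => frameEnd) else frameEnd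
      (fs, fe)
    else (frameStart, frameEnd)
  let n : Int := ts.length
  let a := match fs with | none => 0 | some x => x
  let b := match fe with | none => -1 | some x => x
  let a := if a < 0 then a + n else a
  let b := if b < 0 then b + n else b
  (a, b + 1)

-- ===== PRECONDITION & SPEC =====
def Spec_frameParse_py (ts : List Int) (frameStart : Option Int) (frameEnd : Option Int) (timeStart : Option Int) (timeEnd : Option Int) (out : Int × Int) : Prop := out = frameParse_py_alt ts frameStart frameEnd timeStart timeEnd
instance (ts : List Int) (frameStart : Option Int) (frameEnd : Option Int) (timeStart : Option Int) (timeEnd : Option Int) (out : Int × Int) : Decidable (Spec_frameParse_py ts frameStart frameEnd timeStart timeEnd out) := by unfold Spec_frameParse_py; infer_instance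

-- ===== CLAIM (what is proved, stated in full; the proofs are below) =====
def Claim_equal_frameParse_py : Prop := ∀ (ts : List Int) (frameStart : Option Int) (frameEnd : Option Int) (timeStart : Option Int) (timeEnd : Option Int), Dom_frameParse_py ts frameStart frameEnd timeStart timeEnd → Spec_frameParse_py ts frameStart frameEnd timeStart timeEnd (frameParse_py ts frameStart frameEnd timeStart timeEnd)

-- ===== LEMMAS AND PROOFS =====

-- spec helpers: first index from i with t > v; last index from i with t < v
def fgt : List Int → Int → Int → Option Int
  | [], _, _ => none
  | t :: r, v, i => if t > v then some i else fgt r v (i + 1)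

def llt : List Int → Int → Int → Option Int
  | [], _, _ => none
  | t :: r, v, i => match llt r v (i + 1) with
                    | some j => some j
                    | none => if t < v then some i else none

theorem aFwd_eq_fgt (ts : List Int) (v i : Int) :
    aFwd ts v i = (fgt ts v i).map (fun j => j - 1) := by
  induction ts generalizing i with
  | nil => rfl
  | cons t r ih => simp only [aFwd, fgt]; split <;> simp [ih]

theorem aRev_append (xs ys : List (Int × Int)) (v : Int) :
    aRev (xs ++ ys) v = match aRev xs v with
                        | some j => some j
                        | none => aRev ys v := by
  induction xs with
  | nil => rfl
  | cons p r ih => obtain ⟨i, t⟩ := p; simp only [List.cons_append, aRev]; split <;> simp [ih]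

theorem aRev_eq_llt (ts : List Int) (v i : Int) :
    aRev (aEnum ts i).reverse v = llt ts v i := by
  induction ts generalizing i with
  | nil => rfl
  | cons t r ih =>
    rw [show aEnum (t :: r) i = (i, t) :: aEnum r (i + 1) from rfl, List.reverse_cons,
      aRev_append, ih,
      show llt (t :: r) v i = (match llt r v (i + 1) with
        | some j => some j
        | none => if t < v then some i else none) from rfl]
    cases llt r v (i + 1) <;> simp [aRev]

theorem bScan_spec (ts : List Int) (tS tE : Option Int) (fg ll : Option Int) (i : Int) :
    bScan ts tS tE fg ll i =
      ((match tS with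
        | none => fg
        | some v => match fg with | some j => some j | none => fgt ts v i),
       (match tE with
        | none => ll
        | some v => match llt ts v i with | some j => some j | none => ll)) := by
  induction ts generalizing fg ll i with
  | nil => cases tS <;> cases tE <;> cases fg <;> cases ll <;> rfl
  | cons t r ih =>
    rcases tS with _ | vS <;> rcases tE with _ | vE
    · simpa [bScan] using ih fg ll (i + 1)
    · simp only [bScan, llt]
      rw [ih]
      by_cases h : t < vE <;> cases hl : llt r vE (i + 1) <;> simp [h, hl]
    · simp only [bScan, fgt]
      rw [ih]
      rcases fg with _ | j
      · by_cases h : t > vS <;> simp [h]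
      · simp
    · simp only [bScan, fgt, llt]
      rw [ih]
      rcases fg with _ | j <;> by_cases h : t > vS <;> by_cases h2 : t < vE <;>
        cases hl : llt r vE (i + 1) <;> simp [h, h2, hl]

-- ===== VERDICT (by name: the statement is the Claim_ definition above) =====
theorem frameParse_py_spec : Claim_equal_frameParse_py := by
  intro ts frameStart frameEnd timeStart timeEnd _
  unfold Spec_frameParse_py frameParse_py frameParse_py_alt
  rcases timeStart with _ | vS <;> rcases timeEnd with _ | vE <;>
    simp only [bScan_spec, aFwd_eq_fgt, aRev_eq_llt]
  · cases frameStart <;> cases frameEnd <;> rfl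
  · cases llt ts vE 0 <;> cases frameStart <;> cases frameEnd <;> rfl
  · cases fgt ts vS 0 <;> cases frameStart <;> cases frameEnd <;> rfl
  · cases fgt ts vS 0 <;> cases llt ts vE 0 <;> cases frameStart <;> cases frameEnd <;> rfl
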